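-- pv_equiv track=rewrite | github.com/rayguo233/mystock | scripts/import_ibkr_data.py | get_start_n_end
-- ===== SOURCE A (Python) =====
-- def get_start_n_end(lines: list[str], start_str: str) -> tuple[int, int]:
--     first_line_num = None
--     for i, line in enumerate(lines, start=1):
--         if first_line_num and not line.startswith(start_str):
--             return first_line_num, i - 1
--         if not first_line_num and line.startswith(start_str):
--             first_line_num = i
--     return first_line_num, len(lines)
-- ===== SOURCE B (Python) =====
-- def get_start_n_end(lines: list[str], start_str: str) -> tuple[int, int]:
--     mask = [line.startswith(start_str) for line in lines]
--     if True not in mask: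
--         return None, len(lines)
--     start = mask.index(True)
--     try:
--         end = mask.index(False, start)
--     except ValueError:
--         end = len(mask)
--     return start + 1, end
-- ===== Notes on version B (the rewrite author's own statement) =====
-- stated objective: alternative
-- what changed: Instead of A's flag-driven scan over the lines, B precomputes a boolean match mask in one comprehension and then derives the block bounds purely by index lookups on the mask (index of the first True, index of the first False from there).
import Mathlib
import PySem

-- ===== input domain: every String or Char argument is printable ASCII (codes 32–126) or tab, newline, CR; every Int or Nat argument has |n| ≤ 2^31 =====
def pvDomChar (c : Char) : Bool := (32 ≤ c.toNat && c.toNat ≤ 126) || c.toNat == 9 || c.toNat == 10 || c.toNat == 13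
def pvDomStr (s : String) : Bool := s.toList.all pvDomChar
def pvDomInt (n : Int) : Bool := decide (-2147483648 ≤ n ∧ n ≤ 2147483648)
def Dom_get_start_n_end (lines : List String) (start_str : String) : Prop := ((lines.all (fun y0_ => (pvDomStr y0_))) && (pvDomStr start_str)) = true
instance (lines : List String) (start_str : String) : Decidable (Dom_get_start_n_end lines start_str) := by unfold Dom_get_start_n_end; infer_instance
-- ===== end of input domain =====

-- B replaces A's flag-driven scan with a precomputed boolean match mask plus index lookups
-- (index of the first True, index of the first False from there); objective: alternative.


-- ===== PORT A =====
-- A's loop: counter i (enumerate start=1), state first_line_num : Option Int, n = len(lines).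
def pvGoA (s : String) (n : Int) : List String → Int → Option Int → Option Int × Int
  | [], _, fst => (fst, n)
  | l :: ls, i, fst =>
    if fst.isSome && !(PySem.Str.startswith l s) then (fst, i - 1)
    else if fst.isNone && PySem.Str.startswith l s then pvGoA s n ls (i + 1) (some i)
    else pvGoA s n ls (i + 1) fst

def get_start_n_end (lines : List String) (start_str : String) : Option Int × Int :=
  pvGoA start_str (Int.ofNat lines.length) lines 1 none

-- ===== PORT B =====
-- mask = [line.startswith(start_str) for line in lines]; then pure index lookups on mask.
-- 'mask.index(True)' is ported as '(index? mask true).getD 0': the membership guard makes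
-- index? return some, so getD never supplies the default (Python would raise otherwise).
-- 'mask.index(False, start)' (search from position start) is ported exactly as
-- 'start + j' for 'index? (mask.drop start) false = some j', ValueError (none) giving len(mask).
def get_start_n_end_alt (lines : List String) (start_str : String) : Option Int × Int :=
  let mask := lines.map (fun line => PySem.Str.startswith line start_str)
  if !(mask.contains true) then (none, Int.ofNat lines.length)
  else
    let start := (PySem.List.index? mask true).getD 0
    let e : Int := match PySem.List.index? (mask.drop start) false with
      | none => Int.ofNat mask.length
      | some j => Int.ofNat (start + j)
    (some (Int.ofNat (start + 1)), e)

-- ===== PRECONDITION & SPEC =====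
def Spec_get_start_n_end (lines : List String) (start_str : String) (out : Option Int × Int) : Prop := out = get_start_n_end_alt lines start_str
instance (lines : List String) (start_str : String) (out : Option Int × Int) : Decidable (Spec_get_start_n_end lines start_str out) := by unfold Spec_get_start_n_end; infer_instance

-- ===== CLAIM (what is proved, stated in full; the proofs are below) =====
def Claim_equal_get_start_n_end : Prop := ∀ (lines : List String) (start_str : String), Dom_get_start_n_end lines start_str → Spec_get_start_n_end lines start_str (get_start_n_end lines start_str)

-- ===== LEMMAS AND PROOFS =====

-- In the matched state, A's remaining loop returns (fst, position of the first non-matching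
-- line), i.e. the offset i - 1 plus the index of the first False in the remaining mask.
theorem pvGoA_some (s : String) (n : Int) (ls : List String) (i f : Int)
    (h : i - 1 + Int.ofNat ls.length = n) :
    pvGoA s n ls i (some f) =
      (some f, match PySem.List.index? (ls.map (fun l => PySem.Str.startswith l s)) false with
               | none => n
               | some j => i - 1 + Int.ofNat j) := by
  induction ls generalizing i with
  | nil => simp [pvGoA, PySem.List.index?]
  | cons l ls ih =>
    simp at h
    by_cases hm : PySem.Str.startswith l s = true
    · have := ih (i + 1) (by simp; omega)
      rw [pvGoA, this]
      simp only [hm, List.map_cons]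
      rw [PySem.List.index?_cons_of_ne _ (by decide : (true : Bool) ≠ false)]
      cases PySem.List.index? (ls.map (fun l => PySem.Str.startswith l s)) false with
      | none => simp
      | some j => simp; try omega
    · simp only [Bool.not_eq_true] at hm
      rw [pvGoA]
      simp only [hm, List.map_cons]
      rw [PySem.List.index?_cons_self]
      simp

-- In the searching state, A's loop computes: locate the first True in the mask (none -> (None, n)),
-- then the first False from that position on.
theorem pvGoA_none (s : String) (n : Int) (ls : List String) (i : Int)
    (h : i - 1 + Int.ofNat ls.length = n) :
    pvGoA s n ls i none =
      (match PySem.List.index? (ls.map (fun l => PySem.Str.startswith l s)) true with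
       | none => (none, n)
       | some st =>
         (some (i + Int.ofNat st),
          match PySem.List.index? ((ls.map (fun l => PySem.Str.startswith l s)).drop st) false with
          | none => n
          | some j => i - 1 + Int.ofNat st + Int.ofNat j)) := by
  induction ls generalizing i with
  | nil => simp [pvGoA, PySem.List.index?]
  | cons l ls ih =>
    simp at h
    by_cases hm : PySem.Str.startswith l s = true
    · have hrec := pvGoA_some s n ls (i + 1) i (by simp; omega)
      rw [pvGoA, hrec]
      simp only [hm, List.map_cons]
      rw [PySem.List.index?_cons_self]
      simp only [List.drop_zero]
      rw [PySem.List.index?_cons_of_ne _ (by decide : (true : Bool) ≠ false)]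
      cases PySem.List.index? (ls.map (fun l => PySem.Str.startswith l s)) false with
      | none => simp
      | some j => simp; try omega
    · simp only [Bool.not_eq_true] at hm
      have := ih (i + 1) (by simp; omega)
      rw [pvGoA]
      simp only [hm, List.map_cons]
      rw [this, PySem.List.index?_cons_of_ne _ (by decide : (false : Bool) ≠ true)]
      cases hst : PySem.List.index? (ls.map (fun l => PySem.Str.startswith l s)) true with
      | none => simp
      | some st =>
        simp only [Option.map_some, List.drop_succ_cons]
        cases PySem.List.index? ((ls.map (fun l => PySem.Str.startswith l s)).drop st) false with
        | none => simp; try omega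
        | some j => simp; try omega

-- ===== VERDICT (by name: the statement is the Claim_ definition above) =====
theorem get_start_n_end_spec : Claim_equal_get_start_n_end := by
  intro lines start_str _
  unfold Spec_get_start_n_end get_start_n_end get_start_n_end_alt
  dsimp only
  rw [pvGoA_none start_str (Int.ofNat lines.length) lines 1 (by omega)]
  by_cases hc : true ∈ lines.map (fun line => PySem.Str.startswith line start_str)
  · obtain ⟨st, hst⟩ : ∃ st, PySem.List.index? (lines.map (fun line => PySem.Str.startswith line start_str)) true = some st :=
      Option.isSome_iff_exists.mp (by rw [PySem.List.index?_isSome_iff]; exact hc)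
    rw [hst, if_neg (by rw [List.contains_iff_mem.mpr hc]; simp)]
    cases PySem.List.index? ((lines.map (fun line => PySem.Str.startswith line start_str)).drop st) false with
    | none => simp; try omega
    | some j => simp; try omega
  · rw [(PySem.List.index?_eq_none_iff _ true).mpr hc,
      if_pos (by have h2 := fun hcon => hc (List.contains_iff_mem.mp hcon); revert h2; cases (lines.map (fun line => PySem.Str.startswith line start_str)).contains true <;> simp)]
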